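-- pv_equiv track=rewrite | github.com/friday-platform/examples | jira-bugfix-autonomous/agents/jira-bugfix-pr-router/agent.py | _extract_sha_from_commit_url
-- ===== SOURCE A (Python) =====
-- def _extract_sha_from_commit_url(commit_url: object) -> str:
--     """Extract the terminal commit sha from a BB commit URL."""
--     if not isinstance(commit_url, str):
--         return ""
--     # .../commit/<sha> — strip any trailing slash first
--     stripped = commit_url.rstrip("/")
--     idx = stripped.rfind("/commit/")
--     if idx < 0:
--         return ""
--     tail = stripped[idx + len("/commit/") :]
--     # sha is hex; reject obviously bad tails
--     if not tail:
--         return ""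
--     for ch in tail:
--         if ch not in "0123456789abcdefABCDEF":
--             return ""
--     return tail
-- ===== SOURCE B (Python) =====
-- _HEX = "0123456789abcdefABCDEF"
--
--
-- def _scan_back(s, i, pred):
--     """Move i left while the char before it satisfies pred."""
--     while i > 0 and pred(s[i - 1]):
--         i -= 1
--     return i
--
--
-- def _extract_sha_from_commit_url(commit_url: object) -> str:
--     """Extract the terminal commit sha from a BB commit URL.
--
--     Single backward scan over the string: skip trailing slashes, take the
--     maximal hex run before them, and require it to be preceded by "/commit/".
--     """
--     if not isinstance(commit_url, str):
--         return ""
--     i = _scan_back(commit_url, len(commit_url), lambda c: c == "/")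
--     j = _scan_back(commit_url, i, lambda c: c in _HEX)
--     if j == i or j < 8 or commit_url[j - 8:j] != "/commit/":
--         return ""
--     return commit_url[j:i]
-- ===== Notes on version B (the rewrite author's own statement) =====
-- stated objective: alternative
-- what changed: Replaces rstrip + rfind('/commit/') + slice + per-char hex loop with a single backward scan: skip trailing slashes, take the maximal hex run before them, and check it is immediately preceded by '/commit/'.
import Mathlib
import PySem

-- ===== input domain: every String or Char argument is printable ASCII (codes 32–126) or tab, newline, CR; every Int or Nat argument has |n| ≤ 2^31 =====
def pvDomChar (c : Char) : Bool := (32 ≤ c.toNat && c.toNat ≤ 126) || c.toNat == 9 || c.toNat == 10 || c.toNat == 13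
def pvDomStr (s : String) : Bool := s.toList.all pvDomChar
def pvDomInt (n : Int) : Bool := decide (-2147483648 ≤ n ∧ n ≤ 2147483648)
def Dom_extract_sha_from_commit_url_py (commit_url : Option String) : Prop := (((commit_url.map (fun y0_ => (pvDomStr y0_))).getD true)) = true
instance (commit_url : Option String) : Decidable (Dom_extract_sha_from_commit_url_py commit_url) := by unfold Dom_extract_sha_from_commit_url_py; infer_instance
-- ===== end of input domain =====

-- B replaces A's rstrip + rfind("/commit/") + slice + per-char hex loop with a single
-- backward scan (skip trailing slashes, take the maximal hex run, check the "/commit/"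
-- marker just before it); proved to return the same string on every input.

-- shared trivial helper: ch in "0123456789abcdefABCDEF" (a single-char `in` is membership)
def pvHex (c : Char) : Bool := "0123456789abcdefABCDEF".toList.contains c

-- ===== PORT A =====
def extract_sha_from_commit_url_py (commit_url : Option String) : String :=
  match commit_url with
  | none => ""  -- not isinstance(commit_url, str)
  | some s =>
    -- stripped = commit_url.rstrip("/")  (hand port, exact: drop trailing '/' chars)
    let stripped := (s.toList.reverse.dropWhile (fun c => c == '/')).reverse
    let idx := PySem.Chars.rfind stripped "/commit/".toList
    if idx < 0 then ""
    else
      -- tail = stripped[idx + len("/commit/"):]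
      let tail := PySem.Chars.slice stripped (some (idx + 8)) none
      if tail = [] then ""
      -- for ch in tail: if ch not in "0123456789abcdefABCDEF": return ""  /  return tail
      else if tail.all pvHex then String.ofList tail else ""

-- ===== PORT B =====
-- _scan_back(s, i, pred): while i > 0 and pred(s[i-1]): i -= 1
def pvScanBack (pred : Char → Bool) (cs : List Char) : Nat → Nat
  | 0 => 0
  | i+1 => if pred (cs.getD i ' ') then pvScanBack pred cs i else i+1

def extract_sha_from_commit_url_py_alt (commit_url : Option String) : String :=
  match commit_url with
  | none => ""  -- not isinstance(commit_url, str)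
  | some s =>
    let cs := s.toList
    let i := pvScanBack (fun c => c == '/') cs cs.length
    let j := pvScanBack pvHex cs i
    -- commit_url[j-8:j] and commit_url[j:i] ported as drop/take: exact, since the
    -- slices are only decisive when 8 ≤ j ≤ i ≤ len (nonnegative in-range bounds)
    if j == i || decide (j < 8) || ((cs.drop (j-8)).take 8 ≠ "/commit/".toList) then ""
    else String.ofList ((cs.drop j).take (i - j))

-- ===== PRECONDITION & SPEC =====
def Spec_extract_sha_from_commit_url_py (commit_url : Option String) (out : String) : Prop := out = extract_sha_from_commit_url_py_alt commit_url
instance (commit_url : Option String) (out : String) : Decidable (Spec_extract_sha_from_commit_url_py commit_url out) := by unfold Spec_extract_sha_from_commit_url_py; infer_instance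

-- ===== CLAIM (what is proved, stated in full; the proofs are below) =====
def Claim_equal_extract_sha_from_commit_url_py : Prop := ∀ (commit_url : Option String), Dom_extract_sha_from_commit_url_py commit_url → Spec_extract_sha_from_commit_url_py commit_url (extract_sha_from_commit_url_py commit_url)

-- ===== LEMMAS AND PROOFS =====

-- pvScanBack only looks below i
lemma pvScanBack_append (p : Char → Bool) (ys zs : List Char) (i : Nat) (h : i ≤ ys.length) :
    pvScanBack p (ys ++ zs) i = pvScanBack p ys i := by
  induction i with
  | zero => rfl
  | succ i ih =>
    have hi : i < ys.length := h
    simp only [pvScanBack, List.getD_append _ _ _ _ hi]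
    rw [ih (Nat.le_of_lt hi)]

-- pvScanBack computes the length after dropping the maximal p-suffix of cs.take i
lemma pvScanBack_eq (p : Char → Bool) (cs : List Char) (i : Nat) (h : i ≤ cs.length) :
    pvScanBack p cs i = (((cs.take i).reverse.dropWhile p)).length := by
  induction i with
  | zero => rfl
  | succ i ih =>
    have hi : i < cs.length := h
    have htake : cs.take (i+1) = cs.take i ++ [cs[i]] := List.take_succ_eq_append_getElem hi
    simp only [pvScanBack, List.getD_eq_getElem _ _ hi, htake, List.reverse_append,
      List.reverse_singleton, List.singleton_append, List.dropWhile_cons]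
    by_cases hp : p cs[i]
    · simp [hp, ih (Nat.le_of_lt hi)]
    · simp [hp, Nat.min_eq_left (Nat.le_of_lt hi)]

lemma strip_decomp (p : Char → Bool) (t : List Char) :
    t = (t.reverse.dropWhile p).reverse ++ (t.reverse.takeWhile p).reverse := by
  rw [← List.reverse_append, List.takeWhile_append_dropWhile, List.reverse_reverse]

lemma strip_suffix_all (p : Char → Bool) (t : List Char) :
    ((t.reverse.takeWhile p).reverse).all p = true := by
  rw [List.all_eq_true]
  intro x hx
  rw [List.mem_reverse] at hx
  exact List.mem_takeWhile_imp hx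

lemma strip_len_le (p : Char → Bool) (t : List Char) :
    ((t.reverse.dropWhile p).reverse).length ≤ t.length := by
  simpa using List.length_dropWhile_le p t.reverse

lemma all_drop_iff (p : Char → Bool) (t : List Char) (j : Nat) :
    (t.drop j).all p = true ↔ ∀ m, (hm : m < t.length) → j ≤ m → p t[m] := by
  rw [List.all_eq_true]
  constructor
  · intro h m hm hj
    have hlt : m - j < (t.drop j).length := by simp [List.length_drop]; omega
    have : t[m] = (t.drop j)[m - j] := by
      rw [List.getElem_drop]; congr 1; omega
    rw [this]; exact h _ (List.getElem_mem hlt)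
  · intro h x hx
    obtain ⟨k, hk, rfl⟩ := List.getElem_of_mem hx
    rw [List.getElem_drop]
    exact h _ (by simp [List.length_drop] at hk; omega) (Nat.le_add_right _ _)

lemma strip_boundary (p : Char → Bool) (t : List Char)
    (hj : 0 < ((t.reverse.dropWhile p).reverse).length) :
    ∀ (h : ((t.reverse.dropWhile p).reverse).length - 1 < t.length),
      ¬ p t[((t.reverse.dropWhile p).reverse).length - 1] := by
  intro h
  have hne : t.reverse.dropWhile p ≠ [] := by
    intro he; rw [he] at hj; simp at hj
  have hpos : 0 < (t.reverse.dropWhile p).length := by simp at hj; omega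
  have h1 : t[((t.reverse.dropWhile p).reverse).length - 1] =
      ((t.reverse.dropWhile p).reverse ++ (t.reverse.takeWhile p).reverse)[((t.reverse.dropWhile p).reverse).length - 1]'(by
        rw [← strip_decomp]; exact h) :=
    List.getElem_of_eq (strip_decomp p t) h
  rw [h1, List.getElem_append_left (by simp; omega)]
  have h2 : ((t.reverse.dropWhile p).reverse)[((t.reverse.dropWhile p).reverse).length - 1]'(by simp; omega)
      = (t.reverse.dropWhile p)[0]'hpos := by
    rw [List.getElem_eq_getElem_reverse (l := t.reverse.dropWhile p) (i := 0) hpos]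
    congr 1
    simp
  rw [h2, ← List.head_eq_getElem]
  simp [List.head_dropWhile_not p hne]
  exact hne

lemma rfind_go_inv (t sub : List Char) (n : Nat) :
    (PySem.Chars.rfind.go t sub n = -1 ∧ ∀ m, m ≤ n → ¬ sub.isPrefixOf (t.drop m) = true) ∨
    (∃ k : Nat, PySem.Chars.rfind.go t sub n = (k : Int) ∧ k ≤ n ∧
      sub.isPrefixOf (t.drop k) = true ∧
      ∀ m, k < m → m ≤ n → ¬ sub.isPrefixOf (t.drop m) = true) := by
  induction n with
  | zero =>
    by_cases hp : sub.isPrefixOf t = true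
    · right
      exact ⟨0, by simp [PySem.Chars.rfind.go, hp], le_rfl, by rw [List.drop_zero]; exact hp, by omega⟩
    · left
      refine ⟨by simp [PySem.Chars.rfind.go, hp], ?_⟩
      intro m hm
      interval_cases m
      rw [List.drop_zero]
      exact hp
  | succ n ih =>
    by_cases hp : sub.isPrefixOf (t.drop (n+1)) = true
    · right
      exact ⟨n+1, by simp [PySem.Chars.rfind.go, hp], le_rfl, hp, by omega⟩
    · rcases ih with ⟨h1, h2⟩ | ⟨k, h1, h2, h3, h4⟩
      · left
        refine ⟨by simp [PySem.Chars.rfind.go, hp, h1], fun m hm => ?_⟩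
        rcases Nat.lt_or_ge m (n+1) with h | h
        · exact h2 m (by omega)
        · have : m = n + 1 := by omega
          subst this; exact hp
      · right
        refine ⟨k, by simp [PySem.Chars.rfind.go, hp, h1], by omega, h3, fun m hm1 hm2 => ?_⟩
        rcases Nat.lt_or_ge m (n+1) with h | h
        · exact h4 m hm1 (by omega)
        · have : m = n + 1 := by omega
          subst this; exact hp

-- prefix at position m, as isPrefixOf, from the window equality
lemma prefix_of_take_eq (t : List Char) (m : Nat) (hw : (t.drop m).take 8 = "/commit/".toList) :
    "/commit/".toList.isPrefixOf (t.drop m) = true := by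
  rw [List.isPrefixOf_iff_prefix, List.prefix_iff_eq_take]
  exact hw.symm

lemma prefix_len (t : List Char) (m : Nat) (hpre : "/commit/".toList.isPrefixOf (t.drop m) = true) :
    m + 8 ≤ t.length := by
  rw [List.isPrefixOf_iff_prefix] at hpre
  have := hpre.length_le
  simp [List.length_drop] at this ⊢
  omega

lemma prefix_slash (t : List Char) (m : Nat) (hpre : "/commit/".toList.isPrefixOf (t.drop m) = true) :
    ∀ (h : m + 7 < t.length), t[m + 7] = '/' := by
  intro h
  rw [List.isPrefixOf_iff_prefix] at hpre
  have h8 := prefix_len t m (by rw [List.isPrefixOf_iff_prefix]; exact hpre)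
  have h7 : (7 : Nat) < ("/commit/".toList).length := by decide
  have := (hpre.getElem h7).symm
  rw [List.getElem_drop] at this
  rw [this]
  rfl

-- the central fact, on the already-stripped list t
lemma central (t : List Char) :
    (let idx := PySem.Chars.rfind t "/commit/".toList;
     if idx < 0 then ""
     else
       let tail := PySem.Chars.slice t (some (idx + 8)) none
       if tail = [] then "" else if tail.all pvHex then String.ofList tail else "") =
    (let j := ((t.reverse.dropWhile pvHex).reverse).length;
     if j == t.length || decide (j < 8) || ((t.drop (j-8)).take 8 ≠ "/commit/".toList) then ""
     else String.ofList ((t.drop j).take (t.length - j))) := by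
  have hrfind : PySem.Chars.rfind t "/commit/".toList = PySem.Chars.rfind.go t "/commit/".toList t.length := rfl
  have hjle : ((t.reverse.dropWhile pvHex).reverse).length ≤ t.length := strip_len_le pvHex t
  have hsepl : "/commit/".toList = ['/','c','o','m','m','i','t','/'] := rfl
  set j := ((t.reverse.dropWhile pvHex).reverse).length with hjdef
  have hdropj : t.drop j = (t.reverse.takeWhile pvHex).reverse := by
    have h := strip_decomp pvHex t
    rw [hjdef]
    generalize hu : (t.reverse.dropWhile pvHex).reverse = u at h
    generalize hv : (t.reverse.takeWhile pvHex).reverse = v at h ⊢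
    rw [h, ← hu, List.drop_left]
  have hAll : ∀ m, (hm : m < t.length) → j ≤ m → pvHex t[m] := by
    rw [← all_drop_iff, hdropj]
    exact strip_suffix_all pvHex t
  have hBound : 0 < j → ∀ (h : j - 1 < t.length), ¬ pvHex t[j-1] := fun hj h =>
    strip_boundary pvHex t (hjdef ▸ hj) h
  simp only [hrfind]
  rcases rfind_go_inv t "/commit/".toList t.length with ⟨h1, h2⟩ | ⟨k, h1, hkle, hpre, hmax⟩
  · -- no occurrence: A = ""
    rw [h1]
    simp only [show ((-1 : Int) < 0) = True by simp, if_pos trivial]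
    -- B must also fail
    by_cases hc1 : j = t.length
    · simp [hc1]
    by_cases hc2 : j < 8
    · simp [hc2]
    by_cases hc3 : (t.drop (j-8)).take 8 = "/commit/".toList
    · exact absurd (prefix_of_take_eq t (j-8) hc3) (h2 (j-8) (by omega))
    · rw [hsepl] at hc3
      simp [hc2, hc3]
  · -- occurrence at k (the last one)
    rw [h1]
    have hk8 : k + 8 ≤ t.length := prefix_len t k hpre
    have hnneg : ¬ ((k : Int) < 0) := by omega
    rw [if_neg hnneg]
    have hslice : PySem.Chars.slice t (some ((k : Int) + 8)) none = t.drop (k+8) := by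
      show PySem.List.slice t (some ((k : Int) + 8)) none = t.drop (k+8)
      rw [PySem.List.slice_from t (by omega)]
      have h8 : ((k : Int) + 8).toNat = k + 8 := by omega
      rw [h8]
    rw [hslice]
    have hslash : ∀ (h : k + 7 < t.length), t[k+7] = '/' := prefix_slash t k hpre
    have hslashhex : ¬ pvHex '/' := by decide
    by_cases htail : t.drop (k+8) = []
    · -- tail empty: A = "", B must fail
      rw [if_pos htail]
      have hlen8 : t.length = k + 8 := by
        have := congrArg List.length htail
        simp at this
        omega
      by_cases hc1 : j = t.length
      · simp [hc1]
      by_cases hc2 : j < 8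
      · simp [hc2]
      · exfalso
        have hj7 : j ≤ k + 7 := by omega
        have := hAll (k+7) (by omega) hj7
        rw [hslash (by omega)] at this
        exact hslashhex this
    · rw [if_neg htail]
      have hk8lt : k + 8 < t.length := by
        rcases Nat.lt_or_ge (k+8) t.length with h | h
        · exact h
        · exact absurd (by rw [List.drop_eq_nil_iff]; omega) htail
      by_cases hall : (t.drop (k+8)).all pvHex = true
      · -- both succeed with the same string
        rw [if_pos hall]
        have hAll8 : ∀ m, (hm : m < t.length) → k + 8 ≤ m → pvHex t[m] :=
          (all_drop_iff pvHex t (k+8)).mp hall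
        have hj : j = k + 8 := by
          rcases Nat.lt_trichotomy j (k+8) with h | h | h
          · exfalso
            have := hAll (k+7) (by omega) (by omega)
            rw [hslash (by omega)] at this
            exact hslashhex this
          · exact h
          · exfalso
            have hb := hBound (by omega) (by omega)
            exact hb (hAll8 (j-1) (by omega) (by omega))
        have hc1 : ¬ (j = t.length) := by omega
        have hc2 : ¬ (j < 8) := by omega
        have hc3 : (t.drop (j-8)).take 8 = "/commit/".toList := by
          have : j - 8 = k := by omega
          rw [this]
          have := List.isPrefixOf_iff_prefix.mp hpre
          rw [List.prefix_iff_eq_take] at this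
          exact this.symm
        rw [hsepl] at hc3
        have htake : List.take (t.length - j) (List.drop j t) = List.drop (k+8) t := by
          rw [hj]
          exact List.take_of_length_le (by simp)
        simp only [hsepl, hc2, hc3]
        simp [htake]
        omega
      · -- bad char in tail: A = "", B must fail
        rw [if_neg hall]
        by_cases hc1 : j = t.length
        · simp [hc1]
        by_cases hc2 : j < 8
        · simp [hc2]
        by_cases hc3 : (t.drop (j-8)).take 8 = "/commit/".toList
        · exfalso
          have hj8 : j - 8 ≤ k := by
            by_contra hgt
            exact hmax (j-8) (by omega) (by omega) (prefix_of_take_eq t (j-8) hc3)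
          simp only [all_drop_iff] at hall
          push Not at hall
          obtain ⟨m, hm, hm8, hmbad⟩ := hall
          exact hmbad (hAll m hm (by omega))
        · rw [hsepl] at hc3
          simp [hc2, hc3]

-- the B-side condition and result only look at the stripped prefix t
lemma Bside_reduce (t w : List Char) (j : Nat) (hj : j ≤ t.length) :
    (if j == t.length || decide (j < 8) || (((t ++ w).drop (j-8)).take 8 ≠ "/commit/".toList) then ""
     else String.ofList (((t ++ w).drop j).take (t.length - j))) =
    (if j == t.length || decide (j < 8) || ((t.drop (j-8)).take 8 ≠ "/commit/".toList) then ""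
     else String.ofList ((t.drop j).take (t.length - j))) := by
  by_cases h8 : j < 8
  · simp [h8]
  · have hd : (t ++ w).drop (j-8) = t.drop (j-8) ++ w := List.drop_append_of_le_length (by omega)
    have ht : (t.drop (j-8) ++ w).take 8 = (t.drop (j-8)).take 8 := List.take_append_of_le_length (by simp; omega)
    have hd2 : (t ++ w).drop j = t.drop j ++ w := List.drop_append_of_le_length hj
    have ht2 : ((t.drop j) ++ w).take (t.length - j) = (t.drop j).take (t.length - j) := List.take_append_of_le_length (by simp)
    rw [hd, ht, hd2, ht2]

-- ===== VERDICT (by name: the statement is the Claim_ definition above) =====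
theorem extract_sha_from_commit_url_py_spec : Claim_equal_extract_sha_from_commit_url_py := by
  intro commit_url _
  unfold Spec_extract_sha_from_commit_url_py
  cases commit_url with
  | none => rfl
  | some s =>
    have hcw := strip_decomp (fun c => c == '/') s.toList
    set t := (s.toList.reverse.dropWhile (fun c => c == '/')).reverse with hT
    set w := (s.toList.reverse.takeWhile (fun c => c == '/')).reverse with hW
    have hA : extract_sha_from_commit_url_py (some s) =
        (let idx := PySem.Chars.rfind t "/commit/".toList;
         if idx < 0 then ""
         else
           let tail := PySem.Chars.slice t (some (idx + 8)) none
           if tail = [] then "" else if tail.all pvHex then String.ofList tail else "") := rfl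
    clear_value t w
    have hi : pvScanBack (fun c => c == '/') s.toList s.toList.length = t.length := by
      rw [pvScanBack_eq (fun c => c == '/') s.toList s.toList.length le_rfl, List.take_length, hT]
      simp
    have hjv : pvScanBack pvHex s.toList t.length = ((t.reverse.dropWhile pvHex).reverse).length := by
      have h1 : pvScanBack pvHex s.toList t.length = pvScanBack pvHex (t ++ w) t.length := by
        rw [← hcw]
      rw [h1, pvScanBack_append pvHex t w t.length le_rfl,
        pvScanBack_eq pvHex t t.length le_rfl, List.take_length]
      simp
    have hB : extract_sha_from_commit_url_py_alt (some s) =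
        (let j := ((t.reverse.dropWhile pvHex).reverse).length;
         if j == t.length || decide (j < 8) || ((t.drop (j-8)).take 8 ≠ "/commit/".toList) then ""
         else String.ofList ((t.drop j).take (t.length - j))) := by
      show (let cs := s.toList
            let i := pvScanBack (fun c => c == '/') cs cs.length
            let j := pvScanBack pvHex cs i
            if j == i || decide (j < 8) || ((cs.drop (j-8)).take 8 ≠ "/commit/".toList) then ""
            else String.ofList ((cs.drop j).take (i - j))) = _
      simp only [hi, hjv]
      rw [hcw]
      exact Bside_reduce t w _ (strip_len_le pvHex t)
    rw [hA, central t, ← hB]
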